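-- pv_equiv track=rewrite | github.com/meis/aoc2025 | day/04/__init__.py | _removable
-- ===== SOURCE A (Python) =====
-- def _removable(input):
--     removable = []
--     for x in range(len(input)):
--         for y in range(len(input[0])):
--             if input[x][y] != ".":
--                 neighbors = [n for n in _get_neighbors(input, x, y) if n != "."]
--                 if len(neighbors) < 4:
--                     removable.append((x, y))
--     return removable
--
-- def _get_neighbors(grid, x, y):
--     neighbors = []
--     for dx, dy in [
--         (-1, -1),
--         (-1, 0),
--         (-1, 1),
--         (0, -1),
--         (0, 1),
--         (1, 0),
--         (1, -1),
--         (1, 1),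
--     ]:
--         nx, ny = x + dx, y + dy
--         if 0 <= nx < len(grid) and 0 <= ny < len(grid[0]):
--             neighbors.append(grid[nx][ny])
--
--     return neighbors
-- ===== SOURCE B (Python) =====
-- def _removable(input):
--     if not input:
--         return []
--     h, w = len(input), len(input[0])
--     count = {}
--     for x in range(h):
--         for y in range(w):
--             if input[x][y] != ".":
--                 for nx in range(max(x - 1, 0), min(x + 2, h)):
--                     for ny in range(max(y - 1, 0), min(y + 2, w)):
--                         if (nx, ny) != (x, y):
--                             count[(nx, ny)] = count.get((nx, ny), 0) + 1
--     return [(x, y)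
--             for x in range(h)
--             for y in range(w)
--             if input[x][y] != "." and count.get((x, y), 0) < 4]
-- ===== Notes on version B (the rewrite author's own statement) =====
-- stated objective: alternative
-- what changed: Replaced the per-cell gather (for every non-dot cell, build its 8-neighbor list and count non-dots) by a scatter pass: every non-dot cell increments a dict counter at each in-bounds neighbor position, and a second row-major pass emits the non-dot cells whose tally is below 4.
import Mathlib
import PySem

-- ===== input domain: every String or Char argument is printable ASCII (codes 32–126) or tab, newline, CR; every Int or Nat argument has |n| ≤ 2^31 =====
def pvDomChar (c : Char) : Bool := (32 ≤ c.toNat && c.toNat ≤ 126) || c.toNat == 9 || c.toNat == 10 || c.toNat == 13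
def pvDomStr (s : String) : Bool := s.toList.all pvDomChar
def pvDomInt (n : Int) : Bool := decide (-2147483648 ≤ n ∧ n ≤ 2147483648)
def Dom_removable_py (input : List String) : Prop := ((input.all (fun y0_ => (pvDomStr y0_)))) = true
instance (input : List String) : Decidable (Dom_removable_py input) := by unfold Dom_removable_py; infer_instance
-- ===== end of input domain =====

-- B replaces A's per-cell gather of the 8-neighbor list by a scatter pass over a dict counter
-- (each non-dot cell increments its in-bounds neighbors' tallies), then a second row-major pass
-- collects the non-dot cells with tally < 4; same return value, alternative decomposition.

-- ===== PORT A =====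
-- len(input[0]) and input[x][y]: in range under Pre_ (every row at least as long as row 0)
def pvRowLen (grid : List String) : Int := ((PySem.List.pyGetD grid 0 "").toList.length : Int)

def pvCell (grid : List String) (x y : Int) : Char :=
  PySem.List.pyGetD (PySem.List.pyGetD grid x "").toList y '.'

def pvOffsets : List (Int × Int) :=
  [(-1, -1), (-1, 0), (-1, 1), (0, -1), (0, 1), (1, 0), (1, -1), (1, 1)]

-- port of _get_neighbors
def pvGetNeighbors (grid : List String) (x y : Int) : List Char :=
  pvOffsets.foldl (fun acc d =>
    if 0 ≤ x + d.1 ∧ x + d.1 < (grid.length : Int) ∧ 0 ≤ y + d.2 ∧ y + d.2 < pvRowLen grid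
    then acc ++ [pvCell grid (x + d.1) (y + d.2)] else acc) []

def removable_py (input : List String) : List (Int × Int) :=
  (PySem.List.pyRange 0 (input.length : Int) 1).foldl (fun acc x =>
    (PySem.List.pyRange 0 (pvRowLen input) 1).foldl (fun acc y =>
      if pvCell input x y ≠ '.' then
        if ((((pvGetNeighbors input x y).filter (fun n => n ≠ '.')).length : Int) < 4)
        then acc ++ [(x, y)] else acc
      else acc) acc) []

-- ===== PORT B =====
-- the scatter loop of Source B: each non-dot cell increments its in-bounds neighbors' dict tallies
def pvScatter (input : List String) : PySem.Dict (Int × Int) Int :=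
  (PySem.List.pyRange 0 (input.length : Int) 1).foldl (fun d x =>
    (PySem.List.pyRange 0 (pvRowLen input) 1).foldl (fun d y =>
      if pvCell input x y ≠ '.' then
        (PySem.List.pyRange (max (x - 1) 0) (min (x + 2) (input.length : Int)) 1).foldl (fun d nx =>
          (PySem.List.pyRange (max (y - 1) 0) (min (y + 2) (pvRowLen input)) 1).foldl (fun d ny =>
            if (nx, ny) ≠ (x, y) then d.insert (nx, ny) (d.getD (nx, ny) 0 + 1) else d) d) d
      else d) d) PySem.Dict.empty

def removable_py_alt (input : List String) : List (Int × Int) :=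
  if input = [] then []
  else
    let count := pvScatter input
    (PySem.List.pyRange 0 (input.length : Int) 1).flatMap (fun x =>
      ((PySem.List.pyRange 0 (pvRowLen input) 1).filter (fun y =>
        decide (pvCell input x y ≠ '.') && decide (count.getD (x, y) 0 < 4))).map (fun y => (x, y)))

-- ===== PRECONDITION & SPEC =====
-- Pre_: every row at least as long as row 0 (otherwise the Python A raises IndexError on input[x][y])
def Pre_removable_py (input : List String) : Prop :=
  ∀ s ∈ input, (PySem.List.pyGetD input 0 "").toList.length ≤ s.toList.length
instance (input : List String) : Decidable (Pre_removable_py input) := by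
  unfold Pre_removable_py; infer_instance
def pvWitness_removable_py : List String := ["ab.", ".c."]

def Spec_removable_py (input : List String) (out : List (Int × Int)) : Prop := out = removable_py_alt input
instance (input : List String) (out : List (Int × Int)) : Decidable (Spec_removable_py input out) := by unfold Spec_removable_py; infer_instance

-- ===== CLAIM (what is proved, stated in full; the proofs are below) =====
def Claim_equal_removable_py : Prop := ∀ (input : List String), Dom_removable_py input → Pre_removable_py input → Spec_removable_py input (removable_py input)

-- ===== LEMMAS AND PROOFS =====

-- proof-side abstractions
def pvH (input : List String) : Int := (input.length : Int)
def pvND (input : List String) (q : Int × Int) : Bool := decide (pvCell input q.1 q.2 ≠ '.')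
def pvInb (input : List String) (q : Int × Int) : Bool :=
  decide (0 ≤ q.1 ∧ q.1 < pvH input ∧ 0 ≤ q.2 ∧ q.2 < pvRowLen input)
def pvAdj (p q : Int × Int) : Bool :=
  decide (q.1 - 1 ≤ p.1 ∧ p.1 ≤ q.1 + 1 ∧ q.2 - 1 ≤ p.2 ∧ p.2 ≤ q.2 + 1 ∧ p ≠ q)

def pvNbrKeys (input : List String) (x y : Int) : List (Int × Int) :=
  (PySem.List.pyRange (max (x - 1) 0) (min (x + 2) (pvH input)) 1).flatMap (fun nx =>
    ((PySem.List.pyRange (max (y - 1) 0) (min (y + 2) (pvRowLen input)) 1).filter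
      (fun ny => decide ((nx, ny) ≠ (x, y)))).map (fun ny => (nx, ny)))

def pvCellsL (input : List String) : List (Int × Int) :=
  (PySem.List.pyRange 0 (pvH input) 1).flatMap (fun x =>
    (PySem.List.pyRange 0 (pvRowLen input) 1).map (fun y => (x, y)))

def pvKeys (input : List String) : List (Int × Int) :=
  (pvCellsL input).flatMap (fun q => if pvND input q then pvNbrKeys input q.1 q.2 else [])

theorem pv_foldl_flatMap {α β γ : Type} (l : List α) (g : α → List β) (f : γ → β → γ) (init : γ) :
    (l.flatMap g).foldl f init = l.foldl (fun a x => (g x).foldl f a) init := by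
  induction l generalizing init with
  | nil => rfl
  | cons a t ih => simp only [List.flatMap_cons, List.foldl_append, List.foldl_cons, ih]

theorem pv_countP_flatMap {α β : Type} (l : List α) (g : α → List β) (p : β → Bool) :
    ((l.flatMap g).countP p : Nat) = (l.map (fun a => (g a).countP p)).sum := by
  induction l with
  | nil => rfl
  | cons a t ih => simp [List.flatMap_cons, List.countP_append, ih]

theorem pv_sum_ite {α : Type} (l : List α) (P : α → Bool) :
    (l.map (fun a => if P a then 1 else 0)).sum = l.countP P := by
  induction l with
  | nil => rfl
  | cons a t ih =>
      by_cases h : P a <;> simp [h, ih, Nat.add_comm]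

theorem pv_scatter_eq_fold (input : List String) :
    pvScatter input = (pvKeys input).foldl (fun d k => d.insert k (d.getD k 0 + 1)) PySem.Dict.empty := by
  unfold pvScatter pvKeys pvCellsL
  rw [pv_foldl_flatMap, pv_foldl_flatMap]
  apply PySem.List.foldl_congr_mem
  intro d x hx
  rw [List.foldl_map]
  apply PySem.List.foldl_congr_mem
  intro d y hy
  by_cases hnd : pvCell input x y ≠ '.'
  · rw [if_pos hnd]
    have hb : pvND input (x, y) = true := by simp [pvND, hnd]
    rw [hb]
    simp only [if_true]
    unfold pvNbrKeys
    rw [pv_foldl_flatMap]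
    apply PySem.List.foldl_congr_mem
    intro d nx hnx
    rw [List.foldl_map, ← PySem.List.foldl_ite_eq_foldl_filter (p := fun ny => (nx, ny) ≠ (x, y))]
  · rw [if_neg hnd]
    have hb : pvND input (x, y) = false := by simpa [pvND] using hnd
    rw [hb]
    simp only [Bool.false_eq_true, if_false, List.foldl_nil]

theorem pv_getD_scatter (input : List String) (p : Int × Int) :
    (pvScatter input).getD p 0 = ((pvKeys input).count p : Int) := by
  rw [pv_scatter_eq_fold, PySem.Dict.getD_foldl_insert_add_one]
  simp [PySem.Dict.getD_empty]

theorem pv_mem_nbrKeys (input : List String) (x y : Int) (p : Int × Int) :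
    p ∈ pvNbrKeys input x y ↔
      (max (x - 1) 0 ≤ p.1 ∧ p.1 < min (x + 2) (pvH input) ∧
       max (y - 1) 0 ≤ p.2 ∧ p.2 < min (y + 2) (pvRowLen input) ∧ p ≠ (x, y)) := by
  obtain ⟨p1, p2⟩ := p
  simp only [pvNbrKeys, List.mem_flatMap, List.mem_map, List.mem_filter,
    PySem.List.mem_pyRange_one, Prod.mk.injEq, ne_eq, decide_eq_true_eq]
  constructor
  · rintro ⟨nx, ⟨h1, h2⟩, ny, ⟨⟨h3, h4⟩, h5⟩, rfl, rfl⟩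
    refine ⟨h1, h2, h3, h4, ?_⟩
    simpa using h5
  · rintro ⟨h1, h2, h3, h4, h5⟩
    exact ⟨p1, ⟨h1, h2⟩, p2, ⟨⟨h3, h4⟩, by simpa using h5⟩, rfl, rfl⟩

theorem pv_nbrKeys_eq_filter_product (input : List String) (x y : Int) :
    pvNbrKeys input x y =
      ((PySem.List.pyRange (max (x - 1) 0) (min (x + 2) (pvH input)) 1) ×ˢ
       (PySem.List.pyRange (max (y - 1) 0) (min (y + 2) (pvRowLen input)) 1)).filter
        (fun q => decide (q ≠ (x, y))) := by
  unfold pvNbrKeys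
  show _ = (List.flatMap (fun nx => List.map (fun ny => (nx, ny)) _) _).filter _
  rw [List.filter_flatMap]
  apply List.flatMap_congr
  intro nx _
  rw [List.filter_map]
  rfl

theorem pv_nodup_nbrKeys (input : List String) (x y : Int) : (pvNbrKeys input x y).Nodup := by
  rw [pv_nbrKeys_eq_filter_product]
  exact List.Nodup.filter _
    (List.Nodup.product (PySem.List.nodup_pyRange_one _ _) (PySem.List.nodup_pyRange_one _ _))

theorem pv_nodup_cells (input : List String) : (pvCellsL input).Nodup := by
  have : pvCellsL input =
      (PySem.List.pyRange 0 (pvH input) 1) ×ˢ (PySem.List.pyRange 0 (pvRowLen input) 1) := rfl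
  rw [this]
  exact List.Nodup.product (PySem.List.nodup_pyRange_one _ _) (PySem.List.nodup_pyRange_one _ _)

theorem pv_mem_cells (input : List String) (q : Int × Int) :
    q ∈ pvCellsL input ↔ pvInb input q = true := by
  obtain ⟨q1, q2⟩ := q
  have hprod : pvCellsL input =
      (PySem.List.pyRange 0 (pvH input) 1) ×ˢ (PySem.List.pyRange 0 (pvRowLen input) 1) := rfl
  rw [hprod, show ((PySem.List.pyRange 0 (pvH input) 1) ×ˢ (PySem.List.pyRange 0 (pvRowLen input) 1))
      = (PySem.List.pyRange 0 (pvH input) 1).product (PySem.List.pyRange 0 (pvRowLen input) 1) from rfl,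
    List.pair_mem_product, PySem.List.mem_pyRange_one, PySem.List.mem_pyRange_one]
  simp only [pvInb, decide_eq_true_eq]
  tauto

theorem pv_mem_nbrKeys_iff_adj (input : List String) (p q : Int × Int)
    (hp : pvInb input p = true) :
    p ∈ pvNbrKeys input q.1 q.2 ↔ pvAdj p q = true := by
  obtain ⟨p1, p2⟩ := p
  obtain ⟨q1, q2⟩ := q
  rw [pv_mem_nbrKeys]
  simp only [pvInb, decide_eq_true_eq] at hp
  simp only [pvAdj, decide_eq_true_eq, ne_eq, Prod.mk.injEq, not_and]
  omega

theorem pv_count_keys (input : List String) (p : Int × Int) (hp : pvInb input p = true) :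
    (pvKeys input).count p = (pvCellsL input).countP (fun q => pvND input q && pvAdj p q) := by
  rw [List.count_eq_countP]
  unfold pvKeys
  rw [pv_countP_flatMap, ← pv_sum_ite (pvCellsL input) (fun q => pvND input q && pvAdj p q)]
  congr 1
  apply List.map_congr_left
  intro q hq
  by_cases hnd : pvND input q
  · simp only [hnd, if_true, Bool.true_and]
    by_cases hadj : pvAdj p q
    · have hmem : p ∈ pvNbrKeys input q.1 q.2 := (pv_mem_nbrKeys_iff_adj input p q hp).mpr hadj
      rw [← List.count_eq_countP, List.count_eq_one_of_mem (pv_nodup_nbrKeys input q.1 q.2) hmem]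
      simp [hadj]
    · have hmem : p ∉ pvNbrKeys input q.1 q.2 := fun h =>
        hadj ((pv_mem_nbrKeys_iff_adj input p q hp).mp h)
      rw [← List.count_eq_countP, List.count_eq_zero_of_not_mem hmem]
      simp [hadj]
  · simp only [Bool.not_eq_true] at hnd
    simp [hnd]

theorem pv_gather_count (input : List String) (x y : Int) :
    ((pvGetNeighbors input x y).filter (fun n => n ≠ '.')).length
      = pvOffsets.countP (fun d => pvInb input (x + d.1, y + d.2) && pvND input (x + d.1, y + d.2)) := by
  unfold pvGetNeighbors
  rw [PySem.List.foldl_append_ite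
    (p := fun d : Int × Int => 0 ≤ x + d.1 ∧ x + d.1 < (input.length : Int) ∧ 0 ≤ y + d.2 ∧ y + d.2 < pvRowLen input)
    (f := fun d : Int × Int => pvCell input (x + d.1) (y + d.2))]
  rw [List.nil_append, List.filter_map, List.length_map, ← List.countP_eq_length_filter,
    List.countP_filter]
  apply List.countP_congr
  intro d _
  simp [pvInb, pvND, pvH, Function.comp, Bool.and_comm]

theorem pv_counts_agree (input : List String) (p : Int × Int) (hp : pvInb input p = true) :
    (pvCellsL input).countP (fun q => pvND input q && pvAdj p q)
      = pvOffsets.countP (fun d => pvInb input (p.1 + d.1, p.2 + d.2) && pvND input (p.1 + d.1, p.2 + d.2)) := by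
  have hmap : pvOffsets.countP
      (fun d => pvInb input (p.1 + d.1, p.2 + d.2) && pvND input (p.1 + d.1, p.2 + d.2))
      = (pvOffsets.map (fun d => (p.1 + d.1, p.2 + d.2))).countP
          (fun q => pvInb input q && pvND input q) := by
    rw [List.countP_map]; rfl
  rw [hmap, List.countP_eq_length_filter, List.countP_eq_length_filter]
  apply List.Perm.length_eq
  rw [List.perm_ext_iff_of_nodup]
  · intro q
    obtain ⟨q1, q2⟩ := q
    obtain ⟨p1, p2⟩ := p
    simp only [pvInb, decide_eq_true_eq] at hp
    simp only [List.mem_filter, pv_mem_cells, List.mem_map, Bool.and_eq_true]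
    constructor
    · rintro ⟨hcell, hnd, hadj⟩
      simp only [pvAdj, decide_eq_true_eq, ne_eq, Prod.mk.injEq, not_and] at hadj
      refine ⟨⟨(q1 - p1, q2 - p2), ?_, by simp only [Prod.mk.injEq]; omega⟩, hcell, hnd⟩
      simp only [pvOffsets, List.mem_cons, Prod.mk.injEq, List.not_mem_nil, or_false]
      omega
    · rintro ⟨⟨⟨d1, d2⟩, hd, heq⟩, hinb, hnd⟩
      refine ⟨hinb, hnd, ?_⟩
      simp only [Prod.mk.injEq] at heq
      simp only [pvAdj, decide_eq_true_eq, ne_eq, Prod.mk.injEq, not_and]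
      simp only [pvOffsets, List.mem_cons, Prod.mk.injEq, List.not_mem_nil, or_false] at hd
      omega
  · exact List.Nodup.filter _ (pv_nodup_cells input)
  · apply List.Nodup.filter
    apply List.Nodup.map
    · intro a b hab
      obtain ⟨a1, a2⟩ := a; obtain ⟨b1, b2⟩ := b
      simp only [Prod.mk.injEq] at hab ⊢
      exact ⟨by omega, by omega⟩
    · decide

-- ===== VERDICT (by name: the statement is the Claim_ definition above) =====
theorem removable_py_spec : Claim_equal_removable_py := by
  intro input _ _
  unfold Spec_removable_py
  by_cases hnil : input = []
  · subst hnil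
    simp [removable_py, removable_py_alt, PySem.List.pyRange_one_eq_nil (le_refl (0 : Int))]
  · have hA : removable_py input =
        (PySem.List.pyRange 0 (input.length : Int) 1).flatMap (fun x =>
          ((PySem.List.pyRange 0 (pvRowLen input) 1).filter (fun y =>
            decide (pvCell input x y ≠ '.' ∧
              (((pvGetNeighbors input x y).filter (fun n => n ≠ '.')).length : Int) < 4))).map
            (fun y => (x, y))) := by
      unfold removable_py
      have step : ∀ (init : List (Int × Int)),
          (PySem.List.pyRange 0 (input.length : Int) 1).foldl (fun acc x =>
            (PySem.List.pyRange 0 (pvRowLen input) 1).foldl (fun acc y =>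
              if pvCell input x y ≠ '.' then
                if ((((pvGetNeighbors input x y).filter (fun n => n ≠ '.')).length : Int) < 4)
                then acc ++ [(x, y)] else acc
              else acc) acc) init
          = init ++ (PySem.List.pyRange 0 (input.length : Int) 1).flatMap (fun x =>
              ((PySem.List.pyRange 0 (pvRowLen input) 1).filter (fun y =>
                decide (pvCell input x y ≠ '.' ∧
                  (((pvGetNeighbors input x y).filter (fun n => n ≠ '.')).length : Int) < 4))).map
                (fun y => (x, y))) := by
        intro init
        rw [← PySem.List.foldl_append_eq_flatMap]
        apply PySem.List.foldl_congr_mem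
        intro acc x hx
        rw [← PySem.List.foldl_append_ite
          (p := fun y => pvCell input x y ≠ '.' ∧
            (((pvGetNeighbors input x y).filter (fun n => n ≠ '.')).length : Int) < 4)
          (f := fun y => (x, y))]
        apply PySem.List.foldl_congr_mem
        intro acc' y hy
        by_cases h1 : pvCell input x y ≠ '.'
        · by_cases h2 : ((((pvGetNeighbors input x y).filter (fun n => n ≠ '.')).length : Int) < 4)
          · rw [if_pos h1, if_pos h2, if_pos (show _ ∧ _ from ⟨h1, h2⟩)]
          · rw [if_pos h1, if_neg h2, if_neg (fun h : _ ∧ _ => h2 h.2)]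
        · rw [if_neg h1, if_neg (fun h : _ ∧ _ => h1 h.1)]
      exact step []
    rw [hA]
    rw [removable_py_alt, if_neg hnil]
    apply List.flatMap_congr
    intro x hx
    congr 1
    apply List.filter_congr
    intro y hy
    rw [PySem.List.mem_pyRange_one] at hx hy
    have hinb : pvInb input (x, y) = true := by
      simp [pvInb, pvH]; omega
    have hcnt : (pvScatter input).getD (x, y) 0
        = (((pvGetNeighbors input x y).filter (fun n => n ≠ '.')).length : Int) := by
      rw [pv_getD_scatter, pv_count_keys input (x, y) hinb, pv_counts_agree input (x, y) hinb,
        ← pv_gather_count]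
    rw [hcnt]
    simp [Bool.decide_and]
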